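-- pv_equiv track=rewrite | github.com/coco-in-bluemoon/programmers-challenges | 2020 카카오 인턴십/보석 쇼핑.py | solution
-- ===== SOURCE A (Python) =====
-- from collections import defaultdict
--
-- def solution(gems):
--     N = len(set(gems))
--     shopping_cart = defaultdict(int)
--     answer = [1, len(gems)]
--
--     ldx = rdx = 0
--     shopping_cart[gems[ldx]] = 1
--
--     while rdx < len(gems):
--         if len(shopping_cart) == N:
--             if (rdx - ldx) < (answer[1] - answer[0]):
--                 answer = [ldx+1, rdx+1]
--
--             gem = gems[ldx]
--
--             shopping_cart[gem] -= 1
--             if not shopping_cart[gem]: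
--                 shopping_cart.pop(gem)
--
--             ldx += 1
--         else:
--             rdx += 1
--             if rdx < len(gems):
--                 gem = gems[rdx]
--                 shopping_cart[gem] += 1
--
--     return answer
-- ===== SOURCE B (Python) =====
-- def solution(gems):
--     need = len(set(gems))
--     n = len(gems)
--     for length in range(1, n + 1):
--         for s in range(n - length + 1):
--             if len(set(gems[s:s + length])) == need:
--                 return [s + 1, s + length]
-- ===== Notes on version B (the rewrite author's own statement) =====
-- stated objective: alternative
-- what changed: Replaced the two-pointer sliding-window scan with explicit dict bookkeeping by a direct search over window lengths: for each length from 1 up, scan all starts and return the first window whose distinct-element count equals the total number of kinds.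
import Mathlib
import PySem

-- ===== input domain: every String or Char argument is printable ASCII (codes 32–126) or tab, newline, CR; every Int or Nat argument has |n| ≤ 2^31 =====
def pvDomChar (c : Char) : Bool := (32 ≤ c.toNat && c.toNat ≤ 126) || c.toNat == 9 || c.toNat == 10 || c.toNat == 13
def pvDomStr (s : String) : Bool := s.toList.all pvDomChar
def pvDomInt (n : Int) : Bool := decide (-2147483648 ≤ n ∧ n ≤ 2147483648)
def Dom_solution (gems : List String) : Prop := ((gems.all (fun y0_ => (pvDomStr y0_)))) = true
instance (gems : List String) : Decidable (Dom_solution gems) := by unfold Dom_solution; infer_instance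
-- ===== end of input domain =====

-- B replaces A's two-pointer sliding window (with incremental dict bookkeeping) by a direct
-- search over window lengths, shortest first; equal return values on non-empty input (A raises on []).

-- ===== PORT A =====
-- the while-loop of A; fuel is a totality guard only (each iteration advances ldx or rdx)
def aLoop (gems : List String) (N : Nat) (cart : PySem.Dict String Int) (aL aR : Int)
    (ldx rdx : Nat) (fuel : Nat) : List Int :=
  match fuel with
  | 0 => [aL, aR]
  | fuel + 1 =>
    if rdx < gems.length then
      if cart.size = N then
        -- if (rdx - ldx) < (answer[1] - answer[0]): answer = [ldx+1, rdx+1]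
        let p := if ((rdx : Int) - (ldx : Int)) < (aR - aL) then
                   (((ldx : Int) + 1), ((rdx : Int) + 1)) else (aL, aR)
        let gem := gems.getD ldx ""       -- gems[ldx]; always in range when this branch runs
        let c := cart.getD gem 0 - 1      -- shopping_cart[gem] -= 1  (defaultdict read)
        let cart1 := cart.insert gem c
        let cart2 := if c = 0 then cart1.erase gem else cart1   -- if not shopping_cart[gem]: pop
        aLoop gems N cart2 p.1 p.2 (ldx + 1) rdx fuel
      else
        let rdx' := rdx + 1
        if rdx' < gems.length then
          let gem := gems.getD rdx' ""    -- gems[rdx]; in range by the guard just tested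
          aLoop gems N (cart.insert gem (cart.getD gem 0 + 1)) aL aR ldx rdx' fuel
        else
          aLoop gems N cart aL aR ldx rdx' fuel
    else [aL, aR]

def solution (gems : List String) : List Int :=
  match gems with
  | [] => []   -- Python raises IndexError here (gems[0]); excluded by Pre_solution
  | g0 :: _ =>
    let N := (PySem.Set.ofList gems).length          -- N = len(set(gems))
    let cart := (PySem.Dict.empty (κ := String) (ν := Int)).insert g0 1  -- shopping_cart[gems[0]] = 1
    aLoop gems N cart 1 (gems.length : Int) 0 0 (2 * gems.length + 2)

-- ===== PORT B =====
def solution_alt (gems : List String) : List Int :=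
  let need := (PySem.Set.ofList gems).length
  let n := gems.length
  let r := (List.range' 1 n).findSome? (fun (len : Nat) =>
    (List.range (n - len + 1)).findSome? (fun (s : Nat) =>
      if (PySem.Set.ofList (PySem.List.slice gems (some (s : Int)) (some ((s : Int) + (len : Int))))).length = need
      then some [(s : Int) + 1, (s : Int) + (len : Int)] else none))
  r.getD []   -- Python falls off the loop (returns None) only for empty gems; excluded by Pre_solution

-- ===== PRECONDITION & SPEC =====
-- Pre_ excludes only the empty list, on which A raises IndexError (gems[0]).
def Pre_solution (gems : List String) : Prop := gems ≠ []
instance (gems : List String) : Decidable (Pre_solution gems) := by unfold Pre_solution; infer_instance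
def pvWitness_solution : List String := ["a", "b", "a"]
def Spec_solution (gems : List String) (out : List Int) : Prop := out = solution_alt gems
instance (gems : List String) (out : List Int) : Decidable (Spec_solution gems out) := by unfold Spec_solution; infer_instance

-- ===== CLAIM (what is proved, stated in full; the proofs are below) =====
def Claim_equal_solution : Prop := ∀ (gems : List String), Dom_solution gems → Pre_solution gems → Spec_solution gems (solution gems)

-- ===== LEMMAS AND PROOFS =====

-- window gems[l:r] and its number of distinct elements
def win (gems : List String) (l r : Nat) : List String := (gems.drop l).take (r - l)
def dis (gems : List String) (l r : Nat) : Nat := (PySem.Set.ofList (win gems l r)).length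
def kinds (gems : List String) : Nat := (PySem.Set.ofList gems).length

-- ---- window facts ----
lemma win_decomp (gems : List String) {l' l r r' : Nat} (h1 : l' ≤ l) (h2 : r ≤ r') :
    win gems l r = ((win gems l' r').drop (l - l')).take (r - l) := by
  unfold win
  rw [List.drop_take, List.drop_drop, List.take_take]
  have e1 : l' + (l - l') = l := by omega
  have e2 : min (r - l) ((r' - l') - (l - l')) = r - l := by omega
  rw [e1, e2]

lemma win_subset (gems : List String) {l' l r r' : Nat} (h1 : l' ≤ l) (h2 : r ≤ r') :
    win gems l r ⊆ win gems l' r' := by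
  rw [win_decomp gems h1 h2]
  intro x hx
  exact List.drop_subset _ _ (List.take_subset _ _ hx)

lemma win_subset_gems (gems : List String) (l r : Nat) : win gems l r ⊆ gems := by
  intro x hx
  exact List.drop_subset _ _ (List.take_subset _ _ hx)

lemma dis_mono (gems : List String) {l' l r r' : Nat} (h1 : l' ≤ l) (h2 : r ≤ r') :
    dis gems l r ≤ dis gems l' r' := by
  apply List.Subperm.length_le
  apply List.Nodup.subperm (PySem.Set.nodup_ofList _)
  intro x hx
  exact (PySem.Set.mem_ofList _ _).2 (win_subset gems h1 h2 ((PySem.Set.mem_ofList _ _).1 hx))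

lemma dis_le_kinds (gems : List String) (l r : Nat) : dis gems l r ≤ kinds gems := by
  apply List.Subperm.length_le
  apply List.Nodup.subperm (PySem.Set.nodup_ofList _)
  intro x hx
  exact (PySem.Set.mem_ofList _ _).2 (win_subset_gems gems l r ((PySem.Set.mem_ofList _ _).1 hx))

lemma dis_full (gems : List String) : dis gems 0 gems.length = kinds gems := by
  unfold dis win kinds
  simp

lemma win_cons (gems : List String) {l r : Nat} (h1 : l < r) (h2 : l < gems.length) :
    win gems l r = gems[l] :: win gems (l + 1) r := by
  unfold win
  rw [List.drop_eq_getElem_cons h2]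
  have e : r - l = (r - (l + 1)) + 1 := by omega
  rw [e, List.take_succ_cons]

lemma win_snoc (gems : List String) {l r : Nat} (h1 : l ≤ r) (h2 : r < gems.length) :
    win gems l (r + 1) = win gems l r ++ [gems[r]] := by
  unfold win
  have e : r + 1 - l = (r - l) + 1 := by omega
  rw [e, List.take_add_one, List.getElem?_drop]
  have e2 : l + (r - l) = r := by omega
  rw [e2, List.getElem?_eq_getElem h2]
  rfl

lemma win_clamp (gems : List String) (l : Nat) {r : Nat} (h : gems.length ≤ r) :
    win gems l r = win gems l gems.length := by
  unfold win
  rw [List.take_of_length_le (by simp; omega), List.take_of_length_le (by simp)]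

-- ---- minimal window length and leftmost minimal start ----
def goodLenB (gems : List String) (len : Nat) : Bool :=
  (List.range (gems.length + 1)).any
    (fun s => decide (s + len ≤ gems.length ∧ dis gems s (s + len) = kinds gems))

lemma goodLenB_iff (gems : List String) (len : Nat) :
    goodLenB gems len = true ↔ ∃ s, s + len ≤ gems.length ∧ dis gems s (s + len) = kinds gems := by
  unfold goodLenB
  simp only [List.any_eq_true, List.mem_range, decide_eq_true_eq]
  constructor
  · rintro ⟨s, _, hs⟩; exact ⟨s, hs⟩
  · rintro ⟨s, h1, h2⟩; exact ⟨s, by omega, h1, h2⟩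

lemma lstar_ex (gems : List String) (h : gems ≠ []) :
    ∃ len, 0 < len ∧ goodLenB gems len = true := by
  have hn : 0 < gems.length := List.length_pos_of_ne_nil h
  exact ⟨gems.length, hn, (goodLenB_iff _ _).2 ⟨0, by omega, by simpa using dis_full gems⟩⟩

-- minimal window length containing all kinds
def Lstar (gems : List String) (h : gems ≠ []) : Nat := Nat.find (lstar_ex gems h)

lemma sstar_ex (gems : List String) (h : gems ≠ []) :
    ∃ s, s + Lstar gems h ≤ gems.length ∧ dis gems s (s + Lstar gems h) = kinds gems := by
  exact (goodLenB_iff _ _).1 (Nat.find_spec (lstar_ex gems h)).2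

-- leftmost start of a minimal-length window containing all kinds
def Sstar (gems : List String) (h : gems ≠ []) : Nat := Nat.find (sstar_ex gems h)

lemma lstar_le (gems : List String) (h : gems ≠ []) : Lstar gems h ≤ gems.length := by
  exact Nat.find_le ⟨List.length_pos_of_ne_nil h,
    (goodLenB_iff _ _).2 ⟨0, by omega, by simpa using dis_full gems⟩⟩

lemma kinds_pos (gems : List String) (h : gems ≠ []) : 0 < kinds gems := by
  obtain ⟨g0, rest, rfl⟩ := List.exists_cons_of_ne_nil h
  have hm : g0 ∈ PySem.Set.ofList (g0 :: rest) :=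
    (PySem.Set.mem_ofList (g0 :: rest) g0).2 List.mem_cons_self
  exact List.length_pos_of_mem hm

-- ---- Dict.erase facts (erase = filtering the items list; not in the PySem book) ----
lemma find?_filter_ne {κ ν : Type} [BEq κ] [LawfulBEq κ] (items : List (κ × ν)) (k : κ) :
    (items.filter (fun p => !(p.1 == k))).find? (fun p => p.1 == k) = none := by
  induction items with
  | nil => rfl
  | cons p rest ih =>
    by_cases hp : p.1 = k
    · simp [hp, ih]
    · simp [hp, ih]

lemma find?_filter_other {κ ν : Type} [BEq κ] [LawfulBEq κ] (items : List (κ × ν)) (k k' : κ)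
    (h : k' ≠ k) :
    (items.filter (fun p => !(p.1 == k))).find? (fun p => p.1 == k') = items.find? (fun p => p.1 == k') := by
  induction items with
  | nil => rfl
  | cons p rest ih =>
    by_cases hp : p.1 = k
    · have hfp : ¬((!(p.1 == k)) = true) := by simp [hp]
      have hq : (p.1 == k') = false := beq_eq_false_iff_ne.2 (by rw [hp]; exact fun e => h e.symm)
      rw [List.filter_cons, if_neg hfp, List.find?_cons, hq, ih]
    · have hfp : (!(p.1 == k)) = true := by simp [hp]
      rw [List.filter_cons, if_pos hfp, List.find?_cons, List.find?_cons]
      by_cases hq : p.1 = k'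
      · simp [hq]
      · simp [ih]

lemma get?_erase_self {κ ν : Type} [BEq κ] [LawfulBEq κ] (d : PySem.Dict κ ν) (k : κ) :
    (d.erase k).get? k = none := by
  simp only [PySem.Dict.get?, PySem.Dict.erase]
  rw [find?_filter_ne]
  rfl

lemma get?_erase_of_ne {κ ν : Type} [BEq κ] [LawfulBEq κ] (d : PySem.Dict κ ν) {k k' : κ}
    (h : k' ≠ k) : (d.erase k).get? k' = d.get? k' := by
  simp [PySem.Dict.get?, PySem.Dict.erase, find?_filter_other d.items k k' h]

lemma nodup_keys_erase {κ ν : Type} [BEq κ] (d : PySem.Dict κ ν) (k : κ)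
    (h : d.keys.Nodup) : (d.erase k).keys.Nodup := by
  apply List.Nodup.sublist _ h
  exact List.Sublist.map _ (List.filter_sublist)

-- ---- the counter invariant of A's shopping cart ----
def CartInv (cart : PySem.Dict String Int) (w : List String) : Prop :=
  cart.keys.Nodup ∧ ∀ g, cart.get? g = if w.count g = 0 then none else some ((w.count g : Nat) : Int)

lemma cart_size_eq (cart : PySem.Dict String Int) (w : List String) (h : CartInv cart w) :
    cart.size = (PySem.Set.ofList w).length := by
  obtain ⟨hnd, hget⟩ := h
  have hsz : cart.size = cart.keys.length := by simp [PySem.Dict.size, PySem.Dict.keys]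
  rw [hsz]
  apply List.Perm.length_eq
  rw [List.perm_ext_iff_of_nodup hnd (PySem.Set.nodup_ofList _)]
  intro g
  rw [PySem.Set.mem_ofList]
  by_cases hg : g ∈ w
  · have hcp : w.count g ≠ 0 := by
      have := List.count_pos_iff.2 hg; omega
    have hnone : cart.get? g ≠ none := by rw [hget g]; simp [hcp]
    have hk : g ∈ cart.keys := by
      by_contra hknot
      exact hnone ((PySem.Dict.get?_eq_none_iff_not_mem_keys cart g).2 hknot)
    simp [hk, hg]
  · have hcz : w.count g = 0 := List.count_eq_zero.2 hg
    have hnone : cart.get? g = none := by rw [hget g]; simp [hcz]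
    have hk : g ∉ cart.keys := (PySem.Dict.get?_eq_none_iff_not_mem_keys cart g).1 hnone
    simp [hk, hg]

lemma cartinv_remove (cart : PySem.Dict String Int) (g : String) (w : List String)
    (h : CartInv cart (g :: w)) :
    CartInv (if cart.getD g 0 - 1 = 0 then (cart.insert g (cart.getD g 0 - 1)).erase g
             else cart.insert g (cart.getD g 0 - 1)) w := by
  obtain ⟨hnd, hget⟩ := h
  have hgd : cart.getD g 0 = ((w.count g + 1 : Nat) : Int) := by
    rw [PySem.Dict.getD_eq_get?_getD, hget g]
    simp [List.count_cons_self]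
  by_cases h0 : w.count g = 0
  · have hc : cart.getD g 0 - 1 = 0 := by rw [hgd, h0]; simp
    rw [if_pos hc]
    constructor
    · exact nodup_keys_erase _ _ (PySem.Dict.nodup_keys_insert _ _ _ hnd)
    · intro g'
      by_cases hgg : g' = g
      · subst hgg; rw [get?_erase_self]; simp [h0]
      · rw [get?_erase_of_ne _ hgg, PySem.Dict.get?_insert_of_ne _ _ hgg, hget g',
          List.count_cons_of_ne (fun e => hgg e.symm)]
  · have hc : ¬(cart.getD g 0 - 1 = 0) := by
      rw [hgd]; push_cast; omega
    rw [if_neg hc]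
    constructor
    · exact PySem.Dict.nodup_keys_insert _ _ _ hnd
    · intro g'
      by_cases hgg : g' = g
      · subst hgg
        rw [PySem.Dict.get?_insert_self, hgd]
        have : ((w.count g' + 1 : Nat) : Int) - 1 = ((w.count g' : Nat) : Int) := by push_cast; ring
        rw [this]
        simp [h0]
      · rw [PySem.Dict.get?_insert_of_ne _ _ hgg, hget g',
          List.count_cons_of_ne (fun e => hgg e.symm)]

lemma cartinv_add (cart : PySem.Dict String Int) (w : List String) (g : String)
    (h : CartInv cart w) :
    CartInv (cart.insert g (cart.getD g 0 + 1)) (w ++ [g]) := by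
  obtain ⟨hnd, hget⟩ := h
  have hgd : cart.getD g 0 = ((w.count g : Nat) : Int) := by
    rw [PySem.Dict.getD_eq_get?_getD, hget g]
    by_cases h0 : w.count g = 0 <;> simp [h0]
  constructor
  · exact PySem.Dict.nodup_keys_insert _ _ _ hnd
  · intro g'
    by_cases hgg : g' = g
    · subst hgg
      rw [PySem.Dict.get?_insert_self, hgd]
      have hcnt : (w ++ [g']).count g' = w.count g' + 1 := by
        rw [List.count_append]; simp
      rw [hcnt, if_neg (by omega)]
      norm_cast
    · rw [PySem.Dict.get?_insert_of_ne _ _ hgg, hget g']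
      have hcnt : (w ++ [g]).count g' = w.count g' := by
        rw [List.count_append]
        have hzero : List.count g' [g] = 0 := List.count_eq_zero.2 (by simp [hgg])
        omega
      rw [hcnt]

-- ---- first-hit characterisation of findSome? over a contiguous range ----
lemma findSome?_none {α β : Type} (f : α → Option β) (l : List α)
    (h : ∀ a ∈ l, f a = none) : l.findSome? f = none := by
  induction l with
  | nil => rfl
  | cons a t ih =>
    rw [List.findSome?_cons, h a (by simp)]
    exact ih (fun a ha => h a (by simp [ha]))

lemma findSome?_first {β : Type} (f : Nat → Option β) (k : Nat) : ∀ (a m : Nat) (v : β),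
    a ≤ m → m < a + k → (∀ j, a ≤ j → j < m → f j = none) → f m = some v →
    (List.range' a k).findSome? f = some v := by
  induction k with
  | zero => intro a m v h1 h2 _ _; omega
  | succ k ih =>
    intro a m v h1 h2 h3 h4
    rw [List.range'_succ, List.findSome?_cons]
    rcases Nat.eq_or_lt_of_le h1 with rfl | hlt
    · rw [h4]
    · rw [h3 a le_rfl hlt]
      exact ih (a + 1) m v (by omega) (by omega) (fun j hj1 hj2 => h3 j (by omega) hj2) h4

-- ---- B computes the leftmost minimal window ----
lemma slice_eq_win (gems : List String) (s len : Nat) :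
    PySem.List.slice gems (some (s : Int)) (some ((s : Int) + (len : Int))) = win gems s (s + len) := by
  have e : ((s : Int) + (len : Int)).toNat = s + len := by omega
  rw [PySem.List.slice_toNat gems (by exact_mod_cast Nat.zero_le s) (by positivity), e]
  simp [win]

lemma B_eq (gems : List String) (h : gems ≠ []) :
    solution_alt gems = [(Sstar gems h : Int) + 1, (Sstar gems h : Int) + (Lstar gems h : Int)] := by
  have hnpos : 0 < gems.length := List.length_pos_of_ne_nil h
  have hLpos : 0 < Lstar gems h := (Nat.find_spec (lstar_ex gems h)).1
  have hLn : Lstar gems h ≤ gems.length := lstar_le gems h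
  have hS1 : Sstar gems h + Lstar gems h ≤ gems.length := (Nat.find_spec (sstar_ex gems h)).1
  have hS2 : dis gems (Sstar gems h) (Sstar gems h + Lstar gems h) = kinds gems :=
    (Nat.find_spec (sstar_ex gems h)).2
  have main : (List.range' 1 gems.length).findSome? (fun (len : Nat) =>
      (List.range (gems.length - len + 1)).findSome? (fun (s : Nat) =>
        if (PySem.Set.ofList (PySem.List.slice gems (some (s : Int)) (some ((s : Int) + (len : Int))))).length = (PySem.Set.ofList gems).length
        then some [(s : Int) + 1, (s : Int) + (len : Int)] else none))
      = some [(Sstar gems h : Int) + 1, (Sstar gems h : Int) + (Lstar gems h : Int)] := by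
    apply findSome?_first _ _ 1 (Lstar gems h) _ hLpos (by omega) ?_ ?_
    · -- every shorter length admits no all-kinds window
      intro j hj1 hj2
      apply findSome?_none
      intro s hs
      rw [List.mem_range] at hs
      rw [slice_eq_win, if_neg]
      intro hcontra
      have hgood : goodLenB gems j = true := (goodLenB_iff _ _).2 ⟨s, by omega, hcontra⟩
      have : Lstar gems h ≤ j := Nat.find_le ⟨by omega, hgood⟩
      omega
    · -- at the minimal length, the first all-kinds start is Sstar
      rw [List.range_eq_range']
      apply findSome?_first _ _ 0 (Sstar gems h) _ (Nat.zero_le _) (by omega) ?_ ?_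
      · intro s hs0 hsS
        rw [slice_eq_win, if_neg]
        intro hcontra
        have : Sstar gems h ≤ s := Nat.find_le ⟨by omega, hcontra⟩
        omega
      · rw [slice_eq_win]
        exact if_pos hS2
  simp only [solution_alt]
  rw [main]
  rfl

-- ---- A's loop computes the same ----
lemma aLoop_eq (gems : List String) (h : gems ≠ []) (cart : PySem.Dict String Int)
    (aL aR : Int) (ldx rdx fuel : Nat)
    (hlr : ldx ≤ rdx + 1) (hrn : rdx ≤ gems.length)
    (hc : CartInv cart (win gems ldx (rdx + 1)))
    (h3 : dis gems ldx rdx ≠ kinds gems)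
    (h4a : ldx ≤ Sstar gems h →
      (Lstar gems h : Int) - 1 ≤ aR - aL ∧
      (aR - aL = (Lstar gems h : Int) - 1 →
        aL = (Sstar gems h : Int) + 1 ∧ aR = (Sstar gems h : Int) + (Lstar gems h : Int)))
    (h4b : Sstar gems h < ldx →
      aL = (Sstar gems h : Int) + 1 ∧ aR = (Sstar gems h : Int) + (Lstar gems h : Int))
    (hfuel : (gems.length - ldx) + (gems.length - rdx) + 1 ≤ fuel) :
    aLoop gems (kinds gems) cart aL aR ldx rdx fuel
      = [(Sstar gems h : Int) + 1, (Sstar gems h : Int) + (Lstar gems h : Int)] := by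
  have hkpos : 0 < kinds gems := kinds_pos gems h
  have hLpos : 0 < Lstar gems h := (Nat.find_spec (lstar_ex gems h)).1
  have hS1 : Sstar gems h + Lstar gems h ≤ gems.length := (Nat.find_spec (sstar_ex gems h)).1
  have hS2 : dis gems (Sstar gems h) (Sstar gems h + Lstar gems h) = kinds gems :=
    (Nat.find_spec (sstar_ex gems h)).2
  induction fuel generalizing cart aL aR ldx rdx with
  | zero => omega
  | succ fuel ih =>
    by_cases hr : rdx < gems.length
    · simp only [aLoop, if_pos hr]
      have hdis1 : cart.size = dis gems ldx (rdx + 1) := cart_size_eq _ _ hc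
      by_cases hN : cart.size = kinds gems
      · -- shopping cart holds every kind: record window, advance ldx
        simp only [if_pos hN]
        have hvalid : dis gems ldx (rdx + 1) = kinds gems := by rw [← hdis1]; exact hN
        have hle : ldx ≤ rdx := by
          by_contra hgt
          have hz : rdx + 1 - ldx = 0 := by omega
          have hd0 : dis gems ldx (rdx + 1) = 0 := by unfold dis win; rw [hz]; simp
          omega
        have hlxn : ldx < gems.length := lt_of_le_of_lt hle hr
        have hgetl : gems.getD ldx "" = gems[ldx] := List.getD_eq_getElem gems "" hlxn
        have hlen : Lstar gems h ≤ rdx + 1 - ldx := by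
          apply Nat.find_le
          refine ⟨by omega, (goodLenB_iff _ _).2 ⟨ldx, by omega, ?_⟩⟩
          rw [show ldx + (rdx + 1 - ldx) = rdx + 1 by omega]
          exact hvalid
        have hc2 : CartInv cart (gems[ldx] :: win gems (ldx + 1) (rdx + 1)) := by
          rw [← win_cons gems (by omega) hlxn]; exact hc
        have hc' : CartInv (if cart.getD (gems.getD ldx "") 0 - 1 = 0 then
              (cart.insert (gems.getD ldx "") (cart.getD (gems.getD ldx "") 0 - 1)).erase (gems.getD ldx "")
            else cart.insert (gems.getD ldx "") (cart.getD (gems.getD ldx "") 0 - 1))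
            (win gems (ldx + 1) (rdx + 1)) := by
          rw [hgetl]
          exact cartinv_remove cart gems[ldx] (win gems (ldx + 1) (rdx + 1)) hc2
        have h3' : dis gems (ldx + 1) rdx ≠ kinds gems := by
          intro he
          have h1 : kinds gems ≤ dis gems ldx rdx := he ▸ dis_mono gems (by omega) le_rfl
          exact h3 (le_antisymm (dis_le_kinds _ _ _) h1)
        rcases Nat.lt_trichotomy ldx (Sstar gems h) with hcase | hcase | hcase
        · -- strictly left of the optimum: recorded window is strictly longer than Lstar
          have hne : rdx + 1 - ldx ≠ Lstar gems h := by
            intro he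
            have hgood : dis gems ldx (ldx + Lstar gems h) = kinds gems := by
              rw [show ldx + Lstar gems h = rdx + 1 by omega]
              exact hvalid
            have : Sstar gems h ≤ ldx := Nat.find_le ⟨by omega, hgood⟩
            omega
          by_cases hupd : ((rdx : Int) - (ldx : Int)) < (aR - aL)
          · simp only [if_pos hupd]
            refine ih _ _ _ _ _ (by omega) hrn hc' h3' ?_ ?_ (by omega)
            · intro _
              constructor
              · omega
              · intro heq; exfalso; omega
            · intro hcontra; exfalso; omega
          · simp only [if_neg hupd]
            refine ih _ _ _ _ _ (by omega) hrn hc' h3' ?_ ?_ (by omega)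
            · intro _; exact h4a (by omega)
            · intro hcontra; exfalso; omega
        · -- at the optimum: this is the leftmost minimal window; answer becomes/stays it
          have hlenEq : rdx + 1 - ldx = Lstar gems h := by
            by_contra hne2
            have h6 : Sstar gems h + Lstar gems h ≤ rdx := by omega
            have h7 : kinds gems ≤ dis gems ldx rdx := by
              calc kinds gems = dis gems (Sstar gems h) (Sstar gems h + Lstar gems h) := hS2.symm
                _ ≤ dis gems ldx rdx := dis_mono gems (by omega) h6
            exact h3 (le_antisymm (dis_le_kinds _ _ _) h7)
          by_cases hupd : ((rdx : Int) - (ldx : Int)) < (aR - aL)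
          · simp only [if_pos hupd]
            refine ih _ _ _ _ _ (by omega) hrn hc' h3' ?_ ?_ (by omega)
            · intro hcontra; exfalso; omega
            · intro _; constructor <;> omega
          · simp only [if_neg hupd]
            have heq : aR - aL = (Lstar gems h : Int) - 1 := by
              have := (h4a (by omega)).1
              omega
            obtain ⟨e1, e2⟩ := (h4a (by omega)).2 heq
            refine ih _ _ _ _ _ (by omega) hrn hc' h3' ?_ (fun _ => ⟨e1, e2⟩) (by omega)
            intro hcontra; exfalso; omega
        · -- right of the optimum: answer is already the final one and never improves
          obtain ⟨e1, e2⟩ := h4b hcase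
          have hupd : ¬(((rdx : Int) - (ldx : Int)) < (aR - aL)) := by
            rw [e1, e2]; omega
          simp only [if_neg hupd]
          exact ih _ _ _ _ _ (by omega) hrn hc' h3'
            (fun hcontra => absurd hcontra (by omega)) (fun _ => ⟨e1, e2⟩) (by omega)
      · -- not all kinds present: advance rdx
        simp only [if_neg hN]
        have h3'' : dis gems ldx (rdx + 1) ≠ kinds gems := by rw [← hdis1]; exact hN
        by_cases hr2 : rdx + 1 < gems.length
        · simp only [if_pos hr2]
          have hgetr : gems.getD (rdx + 1) "" = gems[rdx + 1] := List.getD_eq_getElem gems "" hr2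
          have hc' : CartInv (cart.insert (gems.getD (rdx + 1) "") (cart.getD (gems.getD (rdx + 1) "") 0 + 1))
              (win gems ldx (rdx + 1 + 1)) := by
            rw [hgetr, win_snoc gems hlr hr2]
            exact cartinv_add cart _ _ hc
          exact ih _ _ _ _ _ (by omega) (by omega) hc' h3'' h4a h4b (by omega)
        · simp only [if_neg hr2]
          have hc' : CartInv cart (win gems ldx (rdx + 1 + 1)) := by
            rw [win_clamp gems ldx (by omega), ← win_clamp gems ldx (by omega : gems.length ≤ rdx + 1)]
            exact hc
          exact ih _ _ _ _ _ (by omega) (by omega) hc' h3'' h4a h4b (by omega)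
    · -- rdx = len(gems): loop over; no window starting at ldx or later exists, answer is final
      simp only [aLoop, if_neg hr]
      have hrn' : rdx = gems.length := by omega
      have hSlt : Sstar gems h < ldx := by
        rcases Nat.lt_or_ge (Sstar gems h) ldx with hlt | hge
        · exact hlt
        · exfalso
          have h8 : kinds gems ≤ dis gems ldx gems.length := by
            calc kinds gems = dis gems (Sstar gems h) (Sstar gems h + Lstar gems h) := hS2.symm
              _ ≤ dis gems ldx gems.length := dis_mono gems hge hS1
          have : dis gems ldx gems.length = kinds gems := le_antisymm (dis_le_kinds _ _ _) h8
          exact h3 (hrn' ▸ this)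
      obtain ⟨e1, e2⟩ := h4b hSlt
      rw [e1, e2]

-- ===== VERDICT (by name: the statement is the Claim_ definition above) =====
theorem solution_spec : Claim_equal_solution := by
  unfold Claim_equal_solution
  intro gems _ hpre
  unfold Spec_solution
  obtain ⟨g0, rest, rfl⟩ := List.exists_cons_of_ne_nil hpre
  rw [B_eq _ hpre]
  have hLpos : 0 < Lstar (g0 :: rest) hpre := (Nat.find_spec (lstar_ex _ hpre)).1
  have hLn : Lstar (g0 :: rest) hpre ≤ (g0 :: rest).length := lstar_le _ hpre
  have hS1 : Sstar (g0 :: rest) hpre + Lstar (g0 :: rest) hpre ≤ (g0 :: rest).length :=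
    (Nat.find_spec (sstar_ex _ hpre)).1
  have hkpos : 0 < kinds (g0 :: rest) := kinds_pos _ hpre
  have hw : win (g0 :: rest) 0 1 = [g0] := by unfold win; simp
  have hc : CartInv ((PySem.Dict.empty (κ := String) (ν := Int)).insert g0 1) (win (g0 :: rest) 0 1) := by
    rw [hw]
    constructor
    · exact PySem.Dict.nodup_keys_insert _ _ _ PySem.Dict.nodup_keys_empty
    · intro g
      by_cases hg : g = g0
      · subst hg
        rw [PySem.Dict.get?_insert_self]
        simp
      · rw [PySem.Dict.get?_insert_of_ne _ _ hg, PySem.Dict.get?_empty]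
        simp [Ne.symm hg]
  have h3 : dis (g0 :: rest) 0 0 ≠ kinds (g0 :: rest) := by
    have hd0 : dis (g0 :: rest) 0 0 = 0 := by unfold dis win; simp
    omega
  simp only [solution]
  refine aLoop_eq (g0 :: rest) hpre _ _ _ _ _ _ (by omega) (by omega) hc h3 ?_ ?_ (by omega)
  · intro _
    constructor
    · omega
    · intro heq
      have hLN : Lstar (g0 :: rest) hpre = (g0 :: rest).length := by omega
      have hS0 : Sstar (g0 :: rest) hpre = 0 := by omega
      constructor <;> omega
  · intro hcontra; exfalso; omega
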